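-- pv_equiv track=rewrite | github.com/drizztSun/common_project | PythonLeetcode/LeetCodeE/830_PositionsofLargeGroups.py | doit
-- ===== SOURCE A (Python) =====
-- def doit(S):
--     last, s = '', -1
--     ans = []
--     for i in range(len(S) + 1):
--         if i == len(S) or S[i] != last:
--             if i - s >= 3:
--                 ans.append([s, i-1])
--             last = S[i] if i < len(S) else ''
--             s = i
--
--     return ans
-- ===== SOURCE B (Python) =====
-- def doit(S):
--     # two-pointer scan: peel one maximal run [i, j) at a time
--     ans = []
--     i, n = 0, len(S)
--     while i < n:
--         j = i + 1
--         while j < n and S[j] == S[i]: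
--             j += 1
--         if j - i >= 3:
--             ans.append([i, j - 1])
--         i = j
--     return ans
-- ===== Notes on version B (the rewrite author's own statement) =====
-- stated objective: simpler
-- what changed: Replaces A's per-index state machine (sentinel iteration to len(S)+1 with last/s bookkeeping and a final flush) by a recursion that peels one maximal run of equal characters at a time and emits the group if the run length is >= 3.
import Mathlib
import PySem

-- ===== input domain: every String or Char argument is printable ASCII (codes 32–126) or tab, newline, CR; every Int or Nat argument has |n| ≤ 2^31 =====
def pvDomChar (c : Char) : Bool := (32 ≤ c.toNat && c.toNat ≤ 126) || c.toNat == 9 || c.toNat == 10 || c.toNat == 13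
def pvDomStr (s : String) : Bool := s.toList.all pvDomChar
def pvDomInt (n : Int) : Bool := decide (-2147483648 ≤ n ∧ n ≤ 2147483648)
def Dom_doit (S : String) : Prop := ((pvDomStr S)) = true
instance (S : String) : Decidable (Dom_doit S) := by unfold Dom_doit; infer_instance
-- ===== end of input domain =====

-- B re-implements A's per-index state machine (sentinel flush at i = len) as a recursion
-- that peels one maximal run at a time; same return value, objective: simpler decomposition.

-- ===== PORT A =====
-- the for-loop over range(len(S)+1) as structural recursion on the same state;
-- Python's '' / one-char string `last` is rendered as none / some c (exact, since
-- `last` only ever holds '' or a single character); S[i] is cs[i]?, and the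
-- short-circuit `i == len(S) or S[i] != last` is the disjunction in the same order.
def loopA (cs : List Char) (i : Nat) (last : Option Char) (s : Int)
    (ans : List (List Int)) : List (List Int) :=
  if h : i < cs.length + 1 then
    if i = cs.length ∨ cs[i]? ≠ last then
      let ans' := if (i : Int) - s ≥ 3 then ans ++ [[s, (i : Int) - 1]] else ans
      loopA cs (i + 1) (cs[i]?) (i : Int) ans'
    else
      loopA cs (i + 1) last s ans
  else ans
termination_by cs.length + 1 - i

def doit (S : String) : List (List Int) := loopA S.toList 0 none (-1) []

-- ===== PORT B =====
-- inner while-loop of Source B: advance j while S[j] equals the run's character c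
def runEnd (cs : List Char) (c : Char) (j : Nat) : Nat :=
  if h : j < cs.length then
    if cs[j] = c then runEnd cs c (j + 1) else j
  else j
termination_by cs.length - j

theorem runEnd_ge (cs : List Char) (c : Char) : ∀ (j : Nat), j ≤ runEnd cs c j := by
  intro j
  induction hN : cs.length - j using Nat.strong_induction_on generalizing j with
  | _ N ih =>
  rw [runEnd]
  split
  · split
    · rename_i hj _
      subst hN
      exact Nat.le_trans (Nat.le_succ j) (ih (cs.length - (j+1)) (by omega) (j+1) rfl)
    · exact Nat.le_refl j
  · exact Nat.le_refl j

-- outer while-loop of Source B, with the running accumulator ans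
def goB (cs : List Char) (i : Nat) (ans : List (List Int)) : List (List Int) :=
  if h : i < cs.length then
    let j := runEnd cs cs[i] (i + 1)
    let ans' := if (j : Int) - (i : Int) ≥ 3 then ans ++ [[(i : Int), (j : Int) - 1]] else ans
    goB cs j ans'
  else ans
termination_by cs.length - i
decreasing_by
  have := runEnd_ge cs cs[i] (i + 1)
  omega

def doit_alt (S : String) : List (List Int) := goB S.toList 0 []

-- ===== PRECONDITION & SPEC =====
def Spec_doit (S : String) (out : List (List Int)) : Prop := out = doit_alt S
instance (S : String) (out : List (List Int)) : Decidable (Spec_doit S out) := by unfold Spec_doit; infer_instance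

-- ===== CLAIM (what is proved, stated in full; the proofs are below) =====
def Claim_equal_doit : Prop := ∀ (S : String), Dom_doit S → Spec_doit S (doit S)

-- ===== LEMMAS AND PROOFS =====

theorem runEnd_le (cs : List Char) (c : Char) : ∀ (j : Nat), j ≤ cs.length →
    runEnd cs c j ≤ cs.length := by
  intro j
  induction hN : cs.length - j using Nat.strong_induction_on generalizing j with
  | _ N ih
  intro hj
  rw [runEnd]
  split
  · split
    · rename_i h1 _
      subst hN
      exact ih (cs.length - (j+1)) (by omega) (j+1) rfl h1
    · exact hj
  · exact hj

-- runEnd stops at the end of the string or at the first character differing from c,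
-- and every character it skipped equals c
theorem runEnd_spec (cs : List Char) (c : Char) : ∀ (j : Nat),
    (∀ (h : runEnd cs c j < cs.length), cs[runEnd cs c j] ≠ c) ∧
    (∀ k, j ≤ k → k < runEnd cs c j → cs[k]? = some c) := by
  intro j
  induction hN : cs.length - j using Nat.strong_induction_on generalizing j with
  | _ N ih =>
  rw [runEnd]
  split
  · rename_i hj
    split
    · rename_i hc
      subst hN
      obtain ⟨h1, h2⟩ := ih (cs.length - (j+1)) (by omega) (j+1) rfl
      refine ⟨h1, ?_⟩
      intro k hk1 hk2
      rcases Nat.eq_or_lt_of_le hk1 with h | h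
      · subst h
        simp [List.getElem?_eq_getElem hj, hc]
      · exact h2 k h hk2
    · rename_i hc
      exact ⟨fun _ => hc, fun k hk1 hk2 => absurd (Nat.lt_of_le_of_lt hk1 hk2) (Nat.lt_irrefl _)⟩
  · rename_i hj
    exact ⟨fun h => absurd h hj, fun k hk1 hk2 => absurd (Nat.lt_of_le_of_lt hk1 hk2) (Nat.lt_irrefl _)⟩

-- A's loop walks through the interior of a run without changing state
theorem loopA_skip (cs : List Char) (c : Char) (s : Int) (ans : List (List Int)) :
    ∀ (j e : Nat), e = runEnd cs c j → j ≤ cs.length →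
    loopA cs j (some c) s ans = loopA cs e (some c) s ans := by
  intro j e he hj
  induction hN : cs.length - j using Nat.strong_induction_on generalizing j with
  | _ N ih =>
  rw [runEnd] at he
  by_cases hlt : j < cs.length
  · rw [dif_pos hlt] at he
    by_cases hc : cs[j] = c
    · rw [if_pos hc] at he
      rw [loopA]
      have hne : ¬ (j = cs.length ∨ cs[j]? ≠ some c) := by
        rintro (h | h)
        · omega
        · exact h (by simp [List.getElem?_eq_getElem hlt, hc])
      simp only [dif_pos (by omega : j < cs.length + 1), if_neg hne]
      subst hN
      exact ih (cs.length - (j+1)) (by omega) (j+1) he (by omega) rfl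
    · rw [if_neg hc] at he
      subst he; rfl
  · rw [dif_neg hlt] at he
    subst he; rfl

-- main invariant: from a boundary index i (start of a run or end of string),
-- A's remaining loop equals B's remaining loop after flushing the pending group
theorem loopA_main (cs : List Char) : ∀ (N i : Nat) (last : Option Char) (s : Int)
    (ans : List (List Int)),
    cs.length - i ≤ N → i ≤ cs.length →
    (i = cs.length ∨ ∀ (h : i < cs.length), some cs[i] ≠ last) →
    loopA cs i last s ans =
      goB cs i (ans ++ (if (i : Int) - s ≥ 3 then [[s, (i : Int) - 1]] else [])) := by
  intro N
  induction N with
  | zero =>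
    intro i last s ans hN hle _
    have hi : i = cs.length := by omega
    rw [loopA]
    simp only [dif_pos (by omega : i < cs.length + 1), if_pos (Or.inl hi)]
    rw [loopA]
    simp only [dif_neg (by omega : ¬ (i + 1 < cs.length + 1))]
    rw [goB]
    simp only [dif_neg (by omega : ¬ (i < cs.length))]
    split <;> simp
  | succ N ih =>
    intro i last s ans hN hle hbd
    by_cases hi : i < cs.length
    · have hb : some cs[i] ≠ last := (hbd.resolve_left (by omega)) hi
      set c := cs[i] with hc
      set j := runEnd cs c (i + 1) with hj
      have hjge : i + 1 ≤ j := runEnd_ge cs c (i + 1)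
      obtain ⟨hstop, hrun⟩ := runEnd_spec cs c (i + 1)
      have hjle : j ≤ cs.length := runEnd_le cs c (i + 1) (by omega)
      -- A takes the boundary step at i
      rw [loopA]
      have hget : cs[i]? = some c := by simp [List.getElem?_eq_getElem hi, hc]
      have hcond : i = cs.length ∨ some c ≠ last := Or.inr hb
      simp only [dif_pos (by omega : i < cs.length + 1), hget, if_pos hcond]
      -- skips the rest of the run
      rw [loopA_skip cs c (i : Int) _ (i + 1) j hj (by omega)]
      -- and reaches the next boundary j, where the induction hypothesis applies
      rw [ih j (some c) (i : Int) _ (by omega) hjle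
        (by
          by_cases hlt2 : j < cs.length
          · right
            intro h' he
            exact hstop hlt2 (by injection he)
          · left; omega)]
      -- B's step from i is exactly: flush the run [i, j), continue at j
      conv_rhs => rw [goB]
      simp only [dif_pos hi]
      congr 1
      split <;> split <;> simp [← hc, ← hj]
    · exact ih i last s ans (by omega) hle hbd

-- ===== VERDICT (by name: the statement is the Claim_ definition above) =====
theorem doit_spec : Claim_equal_doit := by
  intro S _
  unfold Spec_doit doit doit_alt
  have := loopA_main S.toList S.toList.length 0 none (-1) [] (by omega) (by omega)
    (by
      by_cases h : S.toList.length = 0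
      · left; omega
      · right; intro _ he; simp at he)
  simpa using this
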